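-- pv_equiv track=rewrite | github.com/0xMihalich/alterfat | mkfs/label.py | symbols
-- ===== SOURCE A (Python) =====
-- def symbols(name: str, maxlen: int) -> str:
--     '''compatible Volume label'''
--
--     name = name.rstrip().strip()
--
--     if len(name) > maxlen:
--         name = name[:maxlen]
--
--     for symbol in ('*', '?', '/', '\\', '|', ',', ';', ':', '+', '=', '<', '>', '[', ']', '"', '.'):
--         if symbol in name:
--             name = name.replace(symbol, '_')
--
--     return name
-- ===== SOURCE B (Python) =====
-- FORBIDDEN = set('*?/\\|,;:+=<>[]".')
--
-- def symbols(name: str, maxlen: int) -> str: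
--     '''compatible Volume label'''
--     name = name.strip()
--     if len(name) > maxlen:
--         name = name[:maxlen]
--     return ''.join('_' if c in FORBIDDEN else c for c in name)
-- ===== Notes on version B (the rewrite author's own statement) =====
-- stated objective: simpler
-- what changed: The 16-iteration replace loop (one full replace scan per forbidden symbol) is replaced by a single forward pass mapping each character through one membership test in a precomputed forbidden set; the redundant rstrip().strip() becomes a single strip().
import Mathlib
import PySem

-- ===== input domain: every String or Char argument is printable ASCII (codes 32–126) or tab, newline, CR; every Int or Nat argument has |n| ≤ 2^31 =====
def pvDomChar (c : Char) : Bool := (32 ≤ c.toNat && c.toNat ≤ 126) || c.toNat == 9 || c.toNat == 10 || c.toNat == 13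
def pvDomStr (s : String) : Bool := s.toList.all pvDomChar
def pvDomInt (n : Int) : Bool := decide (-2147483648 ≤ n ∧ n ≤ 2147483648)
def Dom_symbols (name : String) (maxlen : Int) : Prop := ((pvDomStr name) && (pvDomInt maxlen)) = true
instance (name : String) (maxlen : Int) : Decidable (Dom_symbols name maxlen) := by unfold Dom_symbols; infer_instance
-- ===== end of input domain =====

-- B replaces A's 16 sequential whole-string replace scans by one forward pass with a
-- set-membership test (and the redundant rstrip().strip() by strip()); objective: simpler.

-- ===== PORT A =====
-- the for-loop's tuple of 16 one-character symbol strings, in A's order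
def symbolsList : List Char :=
  ['*', '?', '/', '\\', '|', ',', ';', ':', '+', '=', '<', '>', '[', ']', '"', '.']

def symbols (name : String) (maxlen : Int) : String :=
  let n1 := PySem.Chars.strip (PySem.Chars.rstrip name.toList)
  let n2 := if maxlen < (n1.length : Int) then PySem.Chars.slice n1 none (some maxlen) else n1
  String.ofList (symbolsList.foldl
    (fun n sym => if PySem.Chars.isIn [sym] n then PySem.Chars.replace n [sym] ['_'] else n) n2)

-- ===== PORT B =====
-- forbidden = set('*?/\|,;:+=<>[]".')
def forbiddenSet : PySem.Set Char := PySem.Set.ofList "*?/\\|,;:+=<>[]\".".toList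

def symbols_alt (name : String) (maxlen : Int) : String :=
  let n1 := PySem.Chars.strip name.toList
  let n2 := if maxlen < (n1.length : Int) then PySem.Chars.slice n1 none (some maxlen) else n1
  String.ofList (n2.map (fun c => if forbiddenSet.contains c then '_' else c))

-- ===== PRECONDITION & SPEC =====
def Spec_symbols (name : String) (maxlen : Int) (out : String) : Prop := out = symbols_alt name maxlen
instance (name : String) (maxlen : Int) (out : String) : Decidable (Spec_symbols name maxlen out) := by unfold Spec_symbols; infer_instance

-- ===== CLAIM (what is proved, stated in full; the proofs are below) =====
def Claim_equal_symbols : Prop := ∀ (name : String) (maxlen : Int), Dom_symbols name maxlen → Spec_symbols name maxlen (symbols name maxlen)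

-- ===== LEMMAS AND PROOFS =====

-- dropping whitespace on the left commutes with dropping it on the right
theorem lstrip_rstrip_comm (l : List Char) :
    PySem.Chars.rstrip (PySem.Chars.lstrip l) = PySem.Chars.lstrip (PySem.Chars.rstrip l) := by
  induction l with
  | nil => rfl
  | cons c t IH =>
    simp only [PySem.Chars.lstrip, PySem.Chars.rstrip] at *
    by_cases hc : PySem.Chars.isspace c = true
    · rw [List.dropWhile_cons_of_pos hc, IH,
        show (c :: t).reverse = t.reverse ++ [c] from by simp, List.dropWhile_append]
      split_ifs with he
      · have h1 : List.dropWhile PySem.Chars.isspace [c] = ([] : List Char) := by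
          simp [List.dropWhile_cons_of_pos hc]
        have h2 : List.dropWhile PySem.Chars.isspace t.reverse = ([] : List Char) := by
          simpa [List.isEmpty_iff] using he
        simp [h1, h2]
      · simp [List.dropWhile_cons_of_pos hc]
    · rw [List.dropWhile_cons_of_neg hc,
        show (c :: t).reverse = t.reverse ++ [c] from by simp, List.dropWhile_append]
      split_ifs with he
      · have h2 : List.dropWhile PySem.Chars.isspace t.reverse = ([] : List Char) := by
          simpa [List.isEmpty_iff] using he
        simp [List.dropWhile_cons_of_neg hc]
      · simp [List.dropWhile_cons_of_neg hc]

-- stripping the right twice is stripping it once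
theorem rstrip_idem (l : List Char) :
    PySem.Chars.rstrip (PySem.Chars.rstrip l) = PySem.Chars.rstrip l := by
  simp [PySem.Chars.rstrip, List.dropWhile_idempotent]

-- A's name.rstrip().strip() is B's name.strip()
theorem strip_rstrip (l : List Char) :
    PySem.Chars.strip (PySem.Chars.rstrip l) = PySem.Chars.strip l := by
  simp only [PySem.Chars.strip]
  rw [← lstrip_rstrip_comm, rstrip_idem, lstrip_rstrip_comm]

-- replacing a single character is a pointwise map (loop invariant of replace.go)
theorem replace_go_single (c : Char) (l : List Char) : ∀ (fuel : Nat) (acc : List Char),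
    l.length ≤ fuel →
    PySem.Chars.replace.go [c] ['_'] fuel l acc
      = acc.reverse ++ l.map (fun x => if x = c then '_' else x) := by
  induction l with
  | nil => intro fuel acc _; cases fuel <;> simp [PySem.Chars.replace.go]
  | cons c' t IH =>
    intro fuel acc h
    cases fuel with
    | zero => simp at h
    | succ f =>
      simp only [PySem.Chars.replace.go]
      by_cases hp : [c].isPrefixOf (c' :: t) = true
      · have hc' : c' = c := by
          have h' : c = c' := by simpa [List.isPrefixOf] using hp
          exact h'.symm
        rw [if_pos hp]
        have := IH f ('_' :: acc) (by simpa using Nat.lt_succ_iff.mp (by simpa using h))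
        simpa [hc'] using this
      · have hc' : ¬ c' = c := by
          intro he; exact hp (by simp [List.isPrefixOf, he])
        rw [if_neg hp]
        have := IH f (c' :: acc) (by simpa using Nat.lt_succ_iff.mp (by simpa using h))
        simpa [hc'] using this

theorem replace_single (c : Char) (l : List Char) :
    PySem.Chars.replace l [c] ['_'] = l.map (fun x => if x = c then '_' else x) := by
  simp only [PySem.Chars.replace, List.isEmpty_cons]
  simpa using replace_go_single c l l.length [] le_rfl

-- one iteration of A's loop body is a pointwise map (whether or not the symbol occurs)
theorem step_eq_map (c : Char) (l : List Char) :
    (if PySem.Chars.isIn [c] l then PySem.Chars.replace l [c] ['_'] else l)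
      = l.map (fun x => if x = c then '_' else x) := by
  by_cases h : PySem.Chars.isIn [c] l = true
  · rw [if_pos h]; exact replace_single c l
  · rw [if_neg h]
    have hmem : c ∉ l := by
      intro hm
      obtain ⟨s, t, rfl⟩ := List.append_of_mem hm
      exact h ((PySem.Chars.isIn_iff_infix _ _).mpr ⟨s, t, by simp⟩)
    conv_lhs => rw [← List.map_id l]
    refine List.map_congr_left (fun x hx => ?_)
    have : ¬ x = c := fun he => hmem (he ▸ hx)
    simp [this]

-- A's whole loop collapses to a single membership-test map
theorem fold_eq_map (F : List Char) (h : '_' ∉ F) : ∀ (l : List Char),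
    F.foldl (fun n sym => if PySem.Chars.isIn [sym] n then PySem.Chars.replace n [sym] ['_'] else n) l
      = l.map (fun x => if F.contains x then '_' else x) := by
  induction F with
  | nil => intro l; simp
  | cons c F IH =>
    intro l
    have hF : '_' ∉ F := fun hm => h (List.mem_cons_of_mem _ hm)
    rw [List.foldl_cons, step_eq_map, IH hF, List.map_map]
    refine List.map_congr_left (fun x _ => ?_)
    by_cases hx : x = c
    · subst hx
      simp
    · simp [hx]

-- ===== VERDICT (by name: the statement is the Claim_ definition above) =====
theorem symbols_spec : Claim_equal_symbols := by
  intro name maxlen _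
  show symbols name maxlen = symbols_alt name maxlen
  unfold symbols symbols_alt
  rw [strip_rstrip]
  apply congrArg String.ofList
  rw [fold_eq_map symbolsList (by decide)]
  refine List.map_congr_left (fun x _ => ?_)
  have : forbiddenSet.contains x = symbolsList.contains x := by
    have : forbiddenSet = symbolsList := by decide
    rw [this]; rfl
  rw [this]
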